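-- pv_equiv track=rewrite | github.com/txm073/maths | number_theory.py | _segment
-- ===== SOURCE A (Python) =====
-- def sieve(n: int) -> list[int]:
--     assert n <= 100000000, "n is too large, use the segmented_sieve function instead"
--     nums = list(range(2, n))
--     for i in range(len(nums)):
--         if nums[i] == 0:
--             continue
--         j = 2 * nums[i]
--         while j < n:
--             nums[j - 2] = 0
--             j += nums[i]
--     return list(filter(lambda n: n != 0, nums))
--
-- def _segment(nums: list[int], known_primes: list[int]) -> list[int]:
--     lower, upper = nums[0], nums[-1]
--     if not known_primes:
--         return sieve(upper+1)
--     for p in known_primes: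
--         j = lower % p
--         if j != 0:
--             j = p - j
--         while j < upper - lower + 1:
--             nums[j] = 0
--             j += p
--     return list(filter(lambda n: n != 0, nums))
-- ===== SOURCE B (Python) =====
-- def _is_prime(m):
--     d = 2
--     while d * d <= m:
--         if m % d == 0:
--             return False
--         d += 1
--     return True
--
-- def sieve(n):
--     # trial-division sieve: the primes below n
--     return [m for m in range(2, n) if _is_prime(m)]
--
-- def _segment(nums, known_primes):
--     # Per-candidate trial division over the segment instead of per-prime multiple stepping.
--     lower, upper = nums[0], nums[-1]
--     if not known_primes:
--         return sieve(upper + 1)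
--     for i in range(upper - lower + 1):
--         if any((lower + i) % p == 0 for p in known_primes):
--             nums[i] = 0
--     return [n for n in nums if n != 0]
-- ===== Notes on version B (the rewrite author's own statement) =====
-- stated objective: alternative
-- what changed: Replaces A's per-prime multiple-stepping over the segment (segmented-sieve marking, inner while j += p) by a single per-index pass that zeroes nums[i] when lower+i is divisible by any known prime (trial division); the empty-known_primes branch still calls the module's sieve.
import Mathlib
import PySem

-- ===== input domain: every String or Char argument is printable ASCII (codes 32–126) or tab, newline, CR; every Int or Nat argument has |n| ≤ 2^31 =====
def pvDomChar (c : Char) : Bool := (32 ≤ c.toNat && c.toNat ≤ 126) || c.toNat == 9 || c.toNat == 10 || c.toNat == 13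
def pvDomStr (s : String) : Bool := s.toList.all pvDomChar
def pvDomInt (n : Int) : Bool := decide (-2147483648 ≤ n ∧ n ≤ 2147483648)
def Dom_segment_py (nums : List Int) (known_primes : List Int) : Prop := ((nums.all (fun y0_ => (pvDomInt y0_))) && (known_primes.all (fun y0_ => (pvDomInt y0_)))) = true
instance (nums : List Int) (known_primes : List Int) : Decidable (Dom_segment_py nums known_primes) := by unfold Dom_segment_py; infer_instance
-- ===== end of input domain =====

-- B replaces A's per-prime multiple-stepping over the segment by a per-candidate trial-division
-- pass over the segment indices (same in-place zeroing of nums, same empty-known_primes sieve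
-- branch); an alternative algorithm, not claimed faster. Equivalence is about the return value;
-- both Pythons mutate nums at the same positions.


-- ===== PORT A =====
-- sieve's inner `while j < n: nums[j-2] = 0; j += nums[i]`; the `0 < step` guard only makes the
-- recursion total (in sieve the step is always a range value ≥ 2 when the loop body runs).
def sievePyMark (l : List Int) (step n j : Int) : List Int :=
  if h : 0 < step ∧ j < n then
    sievePyMark (l.set (j - 2).toNat 0) step n (j + step)
  else l
termination_by (n - j).toNat
decreasing_by omega

-- port of the module helper `sieve` (the assert's failure case is excluded by Pre_)
def sievePy (n : Int) : List Int :=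
  let nums := PySem.List.pyRange 2 n 1
  let final := (List.range nums.length).foldl (fun acc i =>
    let v := acc.getD i 0
    if v = 0 then acc else sievePyMark acc v n (2 * v)) nums
  final.filter (fun x => x ≠ 0)

-- _segment's inner `while j < upper - lower + 1: nums[j] = 0; j += p`; the `0 < p` guard only
-- makes the recursion total: Python diverges into an IndexError for p < 0 unless the loop is
-- skipped, and Pre_ admits p < 0 only when it is skipped, where this returns l unchanged.
def markPy (l : List Int) (p U j : Int) : List Int :=
  if h : 0 < p ∧ j < U then markPy (l.set j.toNat 0) p U (j + p) else l
termination_by (U - j).toNat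
decreasing_by omega

def segment_py (nums : List Int) (known_primes : List Int) : List Int :=
  let lower := nums.headD 0
  let upper := nums.getLastD 0
  if known_primes = [] then sievePy (upper + 1)
  else
    let marked := known_primes.foldl (fun acc p =>
      let r := PySem.Int.mod lower p
      let j := if r ≠ 0 then p - r else r
      markPy acc p (upper - lower + 1) j) nums
    marked.filter (fun x => x ≠ 0)

-- ===== PORT B =====
-- Source B's `_is_prime`: trial division `while d * d <= m`
def isPrimeLoop (m d : Int) : Bool :=
  if h : d * d ≤ m then
    (if PySem.Int.mod m d = 0 then false else isPrimeLoop m (d + 1))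
  else true
termination_by (m + 2 - d).toNat
decreasing_by
  have h3 : d ≤ d * d + 1 := by
    rcases Int.lt_or_le d 1 with h1 | h1
    · have h2 : 0 ≤ d * d := mul_self_nonneg d
      omega
    · have h2 : d * 1 ≤ d * d := mul_le_mul_of_nonneg_left h1 (le_trans zero_le_one h1)
      rw [mul_one] at h2
      omega
  omega

-- Source B's `sieve`: the trial-division list comprehension
def sieveAlt (n : Int) : List Int :=
  (PySem.List.pyRange 2 n 1).filter (fun m => isPrimeLoop m 2)

def segment_py_alt (nums : List Int) (known_primes : List Int) : List Int :=
  let lower := nums.headD 0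
  let upper := nums.getLastD 0
  if known_primes = [] then sieveAlt (upper + 1)
  else
    let marked := (PySem.List.pyRange 0 (upper - lower + 1) 1).foldl (fun acc i =>
      if known_primes.any (fun p => PySem.Int.mod (lower + i) p == 0) then acc.set i.toNat 0
      else acc) nums
    marked.filter (fun x => x ≠ 0)

-- ===== PRECONDITION & SPEC =====
-- Pre_ is exactly the set of inputs on which Python's _segment RETURNS: nums nonempty (else
-- IndexError), the empty-known_primes sieve branch within its assert bound (else AssertionError),
-- no prime 0 (ZeroDivisionError), every negative prime's marking loop skipped (else it descends
-- into an IndexError), and every positive prime's last mark inside the list (else IndexError).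
def Pre_segment_py (nums : List Int) (known_primes : List Int) : Prop :=
  nums ≠ [] ∧
  (if known_primes = [] then nums.getLastD 0 + 1 ≤ 100000000
   else ∀ p ∈ known_primes,
     let lower := nums.headD 0
     let U := nums.getLastD 0 - lower + 1
     let r := PySem.Int.mod lower p
     let j0 := if r ≠ 0 then p - r else r
     (0 < p ∧ (U ≤ j0 ∨ j0 + p * PySem.Int.floordiv (U - 1 - j0) p < (nums.length : Int))) ∨
     (p < 0 ∧ U ≤ j0))
instance (nums : List Int) (known_primes : List Int) : Decidable (Pre_segment_py nums known_primes) := by unfold Pre_segment_py; infer_instance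

def pvWitness_segment_py : List Int × List Int := ([10, 11, 12, 13, 14], [2, 3])

def Spec_segment_py (nums : List Int) (known_primes : List Int) (out : List Int) : Prop := out = segment_py_alt nums known_primes
instance (nums : List Int) (known_primes : List Int) (out : List Int) : Decidable (Spec_segment_py nums known_primes out) := by unfold Spec_segment_py; infer_instance

-- ===== CLAIM (what is proved, stated in full; the proofs are below) =====
def Claim_equal_segment_py : Prop := ∀ (nums : List Int) (known_primes : List Int), Dom_segment_py nums known_primes → Pre_segment_py nums known_primes → Spec_segment_py nums known_primes (segment_py nums known_primes)

-- ===== LEMMAS AND PROOFS =====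
theorem markPy_getElem? (p U : Int) (hp : 0 < p) (j : Int) (l : List Int) (i : Nat) (hj : 0 ≤ j) :
    (markPy l p U j)[i]? =
      if j ≤ (i : Int) ∧ (i : Int) < U ∧ p ∣ ((i : Int) - j) then l[i]?.map (fun _ => 0)
      else l[i]? := by
  rw [markPy]
  by_cases hlt : j < U
  · rw [dif_pos ⟨hp, hlt⟩, markPy_getElem? p U hp (j + p) _ i (by omega)]
    rw [List.getElem?_set]
    by_cases hij : (i : Int) = j
    · have h1 : j.toNat = i := by omega
      have hnew : ¬((j + p) ≤ (i : Int) ∧ (i : Int) < U ∧ p ∣ ((i : Int) - (j + p))) := by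
        rintro ⟨h, -, -⟩; omega
      have hcond : j ≤ (i : Int) ∧ (i : Int) < U ∧ p ∣ ((i : Int) - j) :=
        ⟨by omega, by omega, by simp [hij]⟩
      rw [if_neg hnew, if_pos h1, if_pos hcond]
      rcases Nat.lt_or_ge i l.length with h | h
      · simp [h, h1, List.getElem?_eq_getElem h]
      · simp [h1, List.getElem?_eq_none (show l.length ≤ i by omega), Nat.not_lt.mpr h]
    · have h1 : ¬ j.toNat = i := by omega
      rw [if_neg h1]
      have hdvd : (p ∣ ((i : Int) - (j + p))) ↔ p ∣ ((i : Int) - j) := by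
        constructor <;> intro h
        · have := dvd_add h (dvd_refl p); simpa [sub_add_cancel, sub_add_eq_add_sub] using this
        · have := dvd_sub h (dvd_refl p); simpa [sub_sub] using this
      by_cases hc : j ≤ (i : Int) ∧ (i : Int) < U ∧ p ∣ ((i : Int) - j)
      · have hge : j + p ≤ (i : Int) := by
          have hpos : 0 < (i : Int) - j := by omega
          have := Int.le_of_dvd hpos hc.2.2
          omega
        rw [if_pos ⟨hge, hc.2.1, hdvd.mpr hc.2.2⟩, if_pos hc]
      · have : ¬((j + p) ≤ (i : Int) ∧ (i : Int) < U ∧ p ∣ ((i : Int) - (j + p))) := by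
          rintro ⟨ha, hb, hd⟩; exact hc ⟨by omega, hb, hdvd.mp hd⟩
        rw [if_neg this, if_neg hc]
  · rw [dif_neg (by tauto)]
    rw [if_neg (by rintro ⟨h1, h2, -⟩; omega)]
termination_by (U - j).toNat
decreasing_by omega

theorem markPy_id_of_nonpos (p U j : Int) (l : List Int) (hp : p ≤ 0) : markPy l p U j = l := by
  rw [markPy, dif_neg (by omega)]

-- j0 facts

theorem j0_spec (lower p : Int) (hp : 0 < p) :
    let r := PySem.Int.mod lower p
    let j0 := if r ≠ 0 then p - r else r
    0 ≤ j0 ∧ j0 < p ∧ p ∣ lower + j0 := by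
  intro r j0
  have h1 : 0 ≤ r := PySem.Int.mod_nonneg lower hp
  have h2 : r < p := PySem.Int.mod_lt lower hp
  have h3 : p ∣ lower - r := by
    refine ⟨PySem.Int.floordiv lower p, ?_⟩
    have := PySem.Int.floordiv_mul_add_mod lower p
    show lower - r = _
    rw [mul_comm]; omega
  by_cases hr : r = 0
  · refine ⟨by simp [j0, hr], by simp [j0, hr, hp], ?_⟩
    simpa [j0, hr] using h3
  · refine ⟨by simp only [j0, if_pos hr]; omega, by simp only [j0, if_pos hr]; omega, ?_⟩
    simp only [j0, if_pos hr]
    have : lower + (p - r) = (lower - r) + p := by ring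
    rw [this]; exact dvd_add h3 (dvd_refl p)

theorem cond_iff (lower p : Int) (hp : 0 < p) (i : Nat) :
    let r := PySem.Int.mod lower p
    let j0 := if r ≠ 0 then p - r else r
    (j0 ≤ (i : Int) ∧ p ∣ ((i : Int) - j0)) ↔ p ∣ (lower + (i : Int)) := by
  obtain ⟨h0, h1, h2⟩ := j0_spec lower p hp
  set r := PySem.Int.mod lower p
  set j0 := if r ≠ 0 then p - r else r
  constructor
  · rintro ⟨-, hd⟩
    have : lower + (i : Int) = (lower + j0) + ((i : Int) - j0) := by ring
    rw [this]; exact dvd_add h2 hd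
  · intro hd
    have hdij : p ∣ ((i : Int) - j0) := by
      have : (i : Int) - j0 = (lower + (i : Int)) - (lower + j0) := by ring
      rw [this]; exact dvd_sub hd h2
    refine ⟨?_, hdij⟩
    by_contra hlt
    push_neg at hlt
    have hpos : 0 < j0 - (i : Int) := by omega
    have h' : p ∣ (j0 - (i : Int)) := by simpa [neg_sub] using dvd_neg.mpr hdij
    have := Int.le_of_dvd hpos h'
    omega

theorem foldA_skip (lower U : Int) : ∀ (kp : List Int) (l : List Int) (i : Nat),
    (¬ ∃ p ∈ kp, 0 < p ∧ (i : Int) < U ∧ p ∣ (lower + (i : Int))) →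
    (kp.foldl (fun acc p =>
        markPy acc p U (if PySem.Int.mod lower p ≠ 0 then p - PySem.Int.mod lower p else PySem.Int.mod lower p)) l)[i]? =
      l[i]? := by
  intro kp
  induction kp with
  | nil => intro l i _; rfl
  | cons p ps IH =>
    intro l i h
    simp only [List.foldl_cons]
    have hh : ¬ ∃ q ∈ ps, 0 < q ∧ (i : Int) < U ∧ q ∣ (lower + (i : Int)) := by
      intro ⟨q, hq, hc⟩; exact h ⟨q, List.mem_cons_of_mem p hq, hc⟩
    rw [IH _ i hh]
    by_cases hp : 0 < p
    · obtain ⟨h0, h1, h2⟩ := j0_spec lower p hp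
      have hiff := cond_iff lower p hp i
      try simp only at h0 h1 h2 hiff
      rw [markPy_getElem? p U hp _ l i h0]
      rw [if_neg ?_]
      intro ⟨hc1, hc2, hc3⟩
      exact h ⟨p, List.mem_cons_self, hp, hc2, hiff.mp ⟨hc1, hc3⟩⟩
    · rw [markPy_id_of_nonpos p U _ l (by omega)]

theorem foldA_mark (lower U : Int) : ∀ (kp : List Int) (l : List Int) (i : Nat),
    (∃ p ∈ kp, 0 < p ∧ (i : Int) < U ∧ p ∣ (lower + (i : Int))) →
    (kp.foldl (fun acc p =>
        markPy acc p U (if PySem.Int.mod lower p ≠ 0 then p - PySem.Int.mod lower p else PySem.Int.mod lower p)) l)[i]? =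
      l[i]?.map (fun _ => 0) := by
  intro kp
  induction kp with
  | nil => intro l i h; simp at h
  | cons p ps IH =>
    intro l i h
    simp only [List.foldl_cons]
    by_cases hh : ∃ q ∈ ps, 0 < q ∧ (i : Int) < U ∧ q ∣ (lower + (i : Int))
    · rw [IH _ i hh]
      by_cases hp : 0 < p
      · obtain ⟨h0, h1, h2⟩ := j0_spec lower p hp
        try simp only at h0 h1 h2
        rw [markPy_getElem? p U hp _ l i h0]
        by_cases hcm : (if PySem.Int.mod lower p ≠ 0 then p - PySem.Int.mod lower p else PySem.Int.mod lower p) ≤ (i : Int) ∧ (i : Int) < U ∧ p ∣ ((i : Int) - (if PySem.Int.mod lower p ≠ 0 then p - PySem.Int.mod lower p else PySem.Int.mod lower p))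
        · rw [if_pos hcm]; cases l[i]? <;> rfl
        · rw [if_neg hcm]
      · rw [markPy_id_of_nonpos p U _ l (by omega)]
    · obtain ⟨q, hq, hq1, hq2, hq3⟩ := h
      rcases List.mem_cons.mp hq with rfl | hq'
      · rw [foldA_skip lower U ps _ i hh]
        obtain ⟨h0, h1, h2⟩ := j0_spec lower q hq1
        have hiff := cond_iff lower q hq1 i
        try simp only at h0 h1 h2 hiff
        rw [markPy_getElem? q U hq1 _ l i h0]
        rw [if_pos ⟨(hiff.mpr hq3).1, hq2, (hiff.mpr hq3).2⟩]
      · exact absurd ⟨q, hq', hq1, hq2, hq3⟩ hh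

theorem foldB_getElem? (lower U : Int) (kp : List Int) :
    ∀ (a : Int) (l : List Int) (i : Nat), 0 ≤ a →
    ((PySem.List.pyRange a U 1).foldl (fun acc q =>
        if kp.any (fun p => PySem.Int.mod (lower + q) p == 0) then acc.set q.toNat 0 else acc) l)[i]? =
      if a ≤ (i : Int) ∧ (i : Int) < U ∧ kp.any (fun p => PySem.Int.mod (lower + (i : Int)) p == 0) = true
      then l[i]?.map (fun _ => 0) else l[i]? := by
  intro a l i ha
  by_cases hlt : a < U
  · rw [PySem.List.pyRange_one_cons hlt]
    simp only [List.foldl_cons]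
    by_cases hstep : kp.any (fun p => PySem.Int.mod (lower + a) p == 0) = true
    · rw [if_pos hstep, foldB_getElem? lower U kp (a + 1) _ i (by omega), List.getElem?_set]
      by_cases hia : (i : Int) = a
      · have h1 : a.toNat = i := by omega
        have hnc : ¬(a + 1 ≤ (i : Int) ∧ (i : Int) < U ∧ kp.any (fun p => PySem.Int.mod (lower + (i : Int)) p == 0) = true) := by
          rintro ⟨h, -, -⟩; omega
        have hc2 : a ≤ (i : Int) ∧ (i : Int) < U ∧ kp.any (fun p => PySem.Int.mod (lower + (i : Int)) p == 0) = true := by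
          refine ⟨by omega, by omega, ?_⟩; rw [hia]; exact hstep
        rw [if_neg hnc, if_pos h1, if_pos hc2]
        rcases Nat.lt_or_ge i l.length with h | h
        · rw [List.getElem?_eq_getElem h]; simp [h1, h]
        · rw [List.getElem?_eq_none (by omega)]; simp [h1, Nat.not_lt.mpr h]
      · have hne : ¬(a.toNat = i) := by omega
        rw [if_neg hne]
        by_cases hc : a + 1 ≤ (i : Int) ∧ (i : Int) < U ∧ kp.any (fun p => PySem.Int.mod (lower + (i : Int)) p == 0) = true
        · have hc0 : a ≤ (i : Int) ∧ (i : Int) < U ∧ kp.any (fun p => PySem.Int.mod (lower + (i : Int)) p == 0) = true :=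
            ⟨by omega, hc.2.1, hc.2.2⟩
          rw [if_pos hc, if_pos hc0]
        · have hc0 : ¬(a ≤ (i : Int) ∧ (i : Int) < U ∧ kp.any (fun p => PySem.Int.mod (lower + (i : Int)) p == 0) = true) := by
            rintro ⟨h1, h2, h3⟩; exact hc ⟨by omega, h2, h3⟩
          rw [if_neg hc, if_neg hc0]
    · rw [if_neg hstep, foldB_getElem? lower U kp (a + 1) _ i (by omega)]
      by_cases hc : a + 1 ≤ (i : Int) ∧ (i : Int) < U ∧ kp.any (fun p => PySem.Int.mod (lower + (i : Int)) p == 0) = true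
      · have hc0 : a ≤ (i : Int) ∧ (i : Int) < U ∧ kp.any (fun p => PySem.Int.mod (lower + (i : Int)) p == 0) = true :=
          ⟨by omega, hc.2.1, hc.2.2⟩
        rw [if_pos hc, if_pos hc0]
      · have hc0 : ¬(a ≤ (i : Int) ∧ (i : Int) < U ∧ kp.any (fun p => PySem.Int.mod (lower + (i : Int)) p == 0) = true) := by
          rintro ⟨h1, h2, h3⟩
          rcases eq_or_lt_of_le h1 with heq | hlt2
          · rw [heq] at hstep; exact hstep h3
          · exact hc ⟨by omega, h2, h3⟩
        rw [if_neg hc, if_neg hc0]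
  · rw [PySem.List.pyRange_one_eq_nil (by omega)]
    have hc0 : ¬(a ≤ (i : Int) ∧ (i : Int) < U ∧ kp.any (fun p => PySem.Int.mod (lower + (i : Int)) p == 0) = true) := by
      rintro ⟨h1, h2, -⟩; omega
    rw [if_neg hc0]
    rfl
termination_by a l i _ => (U - a).toNat
decreasing_by all_goals omega

theorem isPrimeLoop_iff (m : Int) : ∀ (d : Int), 2 ≤ d →
    (isPrimeLoop m d = true ↔ ∀ e : Int, d ≤ e → e * e ≤ m → ¬ e ∣ m) := by
  intro d hd
  rw [isPrimeLoop]
  by_cases hdm : d * d ≤ m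
  · rw [dif_pos hdm]
    by_cases hmod : PySem.Int.mod m d = 0
    · rw [if_pos hmod]
      simp only [Bool.false_eq_true, false_iff]
      intro hall
      exact hall d le_rfl hdm ((PySem.Int.mod_eq_zero_iff_dvd m d).mp hmod)
    · rw [if_neg hmod, isPrimeLoop_iff m (d + 1) (by omega)]
      constructor
      · intro h e hde hee hdvd
        rcases eq_or_lt_of_le hde with heq | hlt
        · rw [← heq] at hdvd
          exact hmod ((PySem.Int.mod_eq_zero_iff_dvd m d).mpr hdvd)
        · exact h e (by omega) hee hdvd
      · intro h e hde hee hdvd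
        exact h e (by omega) hee hdvd
  · rw [dif_neg hdm]
    simp only [true_iff]
    intro e hde hee hdvd
    have : d * d ≤ e * e := by nlinarith
    omega
termination_by d => (m + 2 - d).toNat
decreasing_by
  have h3 : d ≤ d * d + 1 := by
    rcases Int.lt_or_le d 1 with h1 | h1
    · have h2 : 0 ≤ d * d := mul_self_nonneg d
      omega
    · have h2 : d * 1 ≤ d * d := mul_le_mul_of_nonneg_left h1 (le_trans zero_le_one h1)
      rw [mul_one] at h2
      omega
  omega

theorem proper_iff_small (m : Int) (hm : 2 ≤ m) :
    (∃ d : Int, 2 ≤ d ∧ d < m ∧ d ∣ m) ↔ (∃ e : Int, 2 ≤ e ∧ e * e ≤ m ∧ e ∣ m) := by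
  constructor
  · rintro ⟨d, hd2, hdm, c, hc⟩
    by_cases hdd : d * d ≤ m
    · exact ⟨d, hd2, hdd, c, hc⟩
    · have hc2 : 2 ≤ c := by nlinarith
      have hcc : c * c ≤ m := by nlinarith
      exact ⟨c, hc2, hcc, d, by linarith [hc, mul_comm d c]⟩
  · rintro ⟨e, he2, hee, hdvd⟩
    exact ⟨e, he2, by nlinarith, hdvd⟩

def hasDivB (b m : Int) : Bool :=
  (PySem.List.pyRange 2 (b + 1) 1).any (fun d => PySem.Int.mod m d == 0 && decide (d < m))

theorem hasDivB_iff (b m : Int) :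
    hasDivB b m = true ↔ ∃ d : Int, 2 ≤ d ∧ d ≤ b ∧ d < m ∧ d ∣ m := by
  unfold hasDivB
  rw [List.any_eq_true]
  constructor
  · rintro ⟨d, hmem, hcond⟩
    rw [PySem.List.mem_pyRange_one] at hmem
    rw [Bool.and_eq_true, beq_iff_eq, decide_eq_true_iff] at hcond
    exact ⟨d, hmem.1, by omega, hcond.2, (PySem.Int.mod_eq_zero_iff_dvd m d).mp hcond.1⟩
  · rintro ⟨d, h1, h2, h3, h4⟩
    refine ⟨d, ?_, ?_⟩
    · rw [PySem.List.mem_pyRange_one]; omega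
    · rw [Bool.and_eq_true, beq_iff_eq, decide_eq_true_iff]
      exact ⟨(PySem.Int.mod_eq_zero_iff_dvd m d).mpr h4, h3⟩

theorem sievePyMark_getElem? (step n : Int) (hp : 0 < step) (j : Int) (l : List Int) (k : Nat) (hj : 2 ≤ j) :
    (sievePyMark l step n j)[k]? =
      if j ≤ (k : Int) + 2 ∧ (k : Int) + 2 < n ∧ step ∣ ((k : Int) + 2 - j) then l[k]?.map (fun _ => 0)
      else l[k]? := by
  rw [sievePyMark]
  by_cases hlt : j < n
  · rw [dif_pos ⟨hp, hlt⟩, sievePyMark_getElem? step n hp (j + step) _ k (by omega)]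
    rw [List.getElem?_set]
    by_cases hij : (k : Int) + 2 = j
    · have h1 : (j - 2).toNat = k := by omega
      have hnew : ¬(j + step ≤ (k : Int) + 2 ∧ (k : Int) + 2 < n ∧ step ∣ ((k : Int) + 2 - (j + step))) := by
        rintro ⟨h, -, -⟩; omega
      have hcond : j ≤ (k : Int) + 2 ∧ (k : Int) + 2 < n ∧ step ∣ ((k : Int) + 2 - j) :=
        ⟨by omega, by omega, by simp [hij]⟩
      rw [if_neg hnew, if_pos h1, if_pos hcond]
      rcases Nat.lt_or_ge k l.length with h | h
      · rw [List.getElem?_eq_getElem h]; simp [h1, h]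
      · rw [List.getElem?_eq_none (by omega)]; simp [h1, Nat.not_lt.mpr h]
    · have h1 : ¬((j - 2).toNat = k) := by omega
      rw [if_neg h1]
      have hdvd : (step ∣ ((k : Int) + 2 - (j + step))) ↔ step ∣ ((k : Int) + 2 - j) := by
        constructor <;> intro h
        · have := dvd_add h (dvd_refl step); simpa [sub_add_cancel, sub_add_eq_add_sub] using this
        · have := dvd_sub h (dvd_refl step); simpa [sub_sub] using this
      by_cases hc : j ≤ (k : Int) + 2 ∧ (k : Int) + 2 < n ∧ step ∣ ((k : Int) + 2 - j)
      · have hge : j + step ≤ (k : Int) + 2 := by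
          have hpos : 0 < (k : Int) + 2 - j := by omega
          have := Int.le_of_dvd hpos hc.2.2
          omega
        rw [if_pos ⟨hge, hc.2.1, hdvd.mpr hc.2.2⟩, if_pos hc]
      · have hn2 : ¬(j + step ≤ (k : Int) + 2 ∧ (k : Int) + 2 < n ∧ step ∣ ((k : Int) + 2 - (j + step))) := by
          rintro ⟨ha, hb, hd⟩; exact hc ⟨by omega, hb, hdvd.mp hd⟩
        rw [if_neg hn2, if_neg hc]
  · rw [dif_neg (by tauto)]
    rw [if_neg (by rintro ⟨h1, h2, -⟩; omega)]
termination_by (n - j).toNat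
decreasing_by omega

theorem sieve_fold_getElem? (n : Int) : ∀ (t : Nat) (k : Nat),
    ((List.range t).foldl (fun acc i =>
        if acc.getD i 0 = 0 then acc
        else sievePyMark acc (acc.getD i 0) n (2 * acc.getD i 0)) (PySem.List.pyRange 2 n 1))[k]? =
      ((PySem.List.pyRange 2 n 1)[k]?).map
        (fun _ => if hasDivB ((t : Int) + 1) ((k : Int) + 2) then 0 else (k : Int) + 2) := by
  intro t
  induction t with
  | zero =>
    intro k
    simp only [List.range_zero, List.foldl_nil, Nat.cast_zero]
    have hfalse : hasDivB ((0 : Int) + 1) ((k : Int) + 2) = false := by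
      unfold hasDivB
      rw [PySem.List.pyRange_one_eq_nil (by omega)]
      rfl
    simp only [hfalse, Bool.false_eq_true, if_false]
    rcases Nat.lt_or_ge k (PySem.List.pyRange 2 n 1).length with h | h
    · rw [List.getElem?_eq_getElem h, PySem.List.getElem_pyRange_one, Option.map_some]
      congr 1
      omega
    · rw [List.getElem?_eq_none (by omega)]; rfl
  | succ t IH =>
    intro k
    rw [List.range_succ, List.foldl_append, List.foldl_cons, List.foldl_nil]
    have hlen : (PySem.List.pyRange 2 n 1).length = (n - 2).toNat := by
      rw [PySem.List.length_pyRange_one]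
    set base := PySem.List.pyRange 2 n 1 with hbase
    set acc := (List.range t).foldl (fun acc i =>
        if acc.getD i 0 = 0 then acc
        else sievePyMark acc (acc.getD i 0) n (2 * acc.getD i 0)) base with haccdef
    rcases Nat.lt_or_ge t base.length with ht | ht
    · have hbt : base[t]? = some (2 + (t : Int)) := by
        rw [List.getElem?_eq_getElem ht, PySem.List.getElem_pyRange_one]
      have hv : acc.getD t 0 = if hasDivB ((t : Int) + 1) ((t : Int) + 2) then 0 else (t : Int) + 2 := by
        rw [List.getD_eq_getElem?_getD, IH t, hbt]
        rfl
      by_cases hdiv : hasDivB ((t : Int) + 1) ((t : Int) + 2) = true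
      · -- t+2 already composite: step skips; bound extension is vacuous
        rw [hv, if_pos hdiv, if_pos rfl, IH k]
        have hb : hasDivB ((t : Int) + 1 + 1) ((k : Int) + 2) = hasDivB ((t : Int) + 1) ((k : Int) + 2) := by
          by_cases h0 : hasDivB ((t : Int) + 1) ((k : Int) + 2) = true
          · rw [h0, hasDivB_iff]
            obtain ⟨d, hd2, hdb, hdm, hdvd⟩ := (hasDivB_iff _ _).mp h0
            exact ⟨d, hd2, by omega, hdm, hdvd⟩
          · rw [Bool.not_eq_true] at h0
            rw [h0]
            by_cases h1 : hasDivB ((t : Int) + 1 + 1) ((k : Int) + 2) = true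
            · exfalso
              obtain ⟨d, hd2, hdb, hdm, hdvd⟩ := (hasDivB_iff _ _).mp h1
              rcases eq_or_lt_of_le hdb with heq | hlt2
              · obtain ⟨e, he2, heb, hem, hedvd⟩ := (hasDivB_iff _ _).mp hdiv
                have h2 : hasDivB ((t : Int) + 1) ((k : Int) + 2) = true := by
                  rw [hasDivB_iff]
                  refine ⟨e, he2, heb, by omega, hedvd.trans ?_⟩
                  have hdq : d = (t : Int) + 2 := by omega
                  rw [← hdq]; exact hdvd
                rw [h0] at h2; exact absurd h2 (by simp)
              · have h2 : hasDivB ((t : Int) + 1) ((k : Int) + 2) = true := by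
                  rw [hasDivB_iff]; exact ⟨d, hd2, by omega, hdm, hdvd⟩
                rw [h0] at h2; exact absurd h2 (by simp)
            · rw [Bool.not_eq_true] at h1; rw [h1]
        simp only [Nat.cast_succ, hb]
      · -- t+2 survives: marking pass with step t+2
        have hdivf : hasDivB ((t : Int) + 1) ((t : Int) + 2) = false := by
          rw [← Bool.not_eq_true]; exact hdiv
        rw [hv, hdivf]
        simp only [Bool.false_eq_true, if_false]
        rw [if_neg (by omega)]
        rw [sievePyMark_getElem? ((t : Int) + 2) n (by omega) (2 * ((t : Int) + 2)) acc k (by omega)]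
        rw [IH k]
        rcases Nat.lt_or_ge k base.length with hk | hk
        · have hbk : base[k]? = some (2 + (k : Int)) := by
            rw [List.getElem?_eq_getElem hk, PySem.List.getElem_pyRange_one]
          have hkn : (k : Int) + 2 < n := by
            rw [hlen] at hk; omega
          have hdvdshift : ((t : Int) + 2 ∣ ((k : Int) + 2 - 2 * ((t : Int) + 2))) ↔ ((t : Int) + 2 ∣ ((k : Int) + 2)) := by
            constructor <;> intro h
            · have := dvd_add h (⟨2, by ring⟩ : ((t : Int) + 2) ∣ (2 * ((t : Int) + 2)))
              simpa [sub_add_cancel] using this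
            · exact dvd_sub h (⟨2, by ring⟩ : ((t : Int) + 2) ∣ (2 * ((t : Int) + 2)))
          have hbnew : hasDivB ((t : Int) + 1 + 1) ((k : Int) + 2) = true ↔
              (hasDivB ((t : Int) + 1) ((k : Int) + 2) = true ∨
               (2 * ((t : Int) + 2) ≤ (k : Int) + 2 ∧ (t : Int) + 2 ∣ ((k : Int) + 2))) := by
            rw [hasDivB_iff, hasDivB_iff]
            constructor
            · rintro ⟨d, hd2, hdb, hdm, hdvd⟩
              rcases eq_or_lt_of_le hdb with heq | hlt2
              · right
                have hdq : d = (t : Int) + 2 := by omega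
                rw [hdq] at hdvd hdm
                refine ⟨?_, hdvd⟩
                obtain ⟨c, hc⟩ := hdvd
                have ht0 : (0 : Int) ≤ (t : Int) := Int.natCast_nonneg t
                have hc2 : 2 ≤ c := by nlinarith
                nlinarith
              · exact Or.inl ⟨d, hd2, by omega, hdm, hdvd⟩
            · rintro (⟨d, hd2, hdb, hdm, hdvd⟩ | ⟨hge, hdvd⟩)
              · exact ⟨d, hd2, by omega, hdm, hdvd⟩
              · exact ⟨(t : Int) + 2, by omega, by omega, by omega, hdvd⟩
          by_cases hm : 2 * ((t : Int) + 2) ≤ (k : Int) + 2 ∧ (t : Int) + 2 ∣ ((k : Int) + 2)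
          · rw [if_pos ⟨hm.1, hkn, hdvdshift.mpr hm.2⟩]
            have h1 : hasDivB ((t : Int) + 1 + 1) ((k : Int) + 2) = true := hbnew.mpr (Or.inr hm)
            simp only [Nat.cast_succ, h1, hbk]
            cases hh : hasDivB ((t : Int) + 1) ((k : Int) + 2) <;> rfl
          · rw [if_neg (by rintro ⟨h1, hkn2, h3⟩; exact hm ⟨h1, hdvdshift.mp h3⟩)]
            by_cases h0 : hasDivB ((t : Int) + 1) ((k : Int) + 2) = true
            · have h1 : hasDivB ((t : Int) + 1 + 1) ((k : Int) + 2) = true := hbnew.mpr (Or.inl h0)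
              simp only [Nat.cast_succ, h0, h1]
            · rw [Bool.not_eq_true] at h0
              have h1 : hasDivB ((t : Int) + 1 + 1) ((k : Int) + 2) = false := by
                rw [← Bool.not_eq_true]
                intro h2
                rcases hbnew.mp h2 with h3 | h3
                · rw [h0] at h3; exact absurd h3 (by simp)
                · exact hm h3
              simp only [Nat.cast_succ, h0, h1]
        · rw [List.getElem?_eq_none (by omega)]
          simp
    · -- t out of range: step skipped, bound extension vacuous for k in range
      have hbt : base[t]? = none := List.getElem?_eq_none (by omega)
      have hv : acc.getD t 0 = 0 := by
        rw [List.getD_eq_getElem?_getD, IH t, hbt]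
        rfl
      rw [hv, if_pos rfl, IH k]
      rcases Nat.lt_or_ge k base.length with hk | hk
      · have hkt : k < t := lt_of_lt_of_le hk ht
        have hb : hasDivB ((t : Int) + 1 + 1) ((k : Int) + 2) = hasDivB ((t : Int) + 1) ((k : Int) + 2) := by
          by_cases h0 : hasDivB ((t : Int) + 1) ((k : Int) + 2) = true
          · rw [h0, hasDivB_iff]
            obtain ⟨d, hd2, hdb, hdm, hdvd⟩ := (hasDivB_iff _ _).mp h0
            exact ⟨d, hd2, by omega, hdm, hdvd⟩
          · rw [Bool.not_eq_true] at h0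
            rw [h0]
            by_cases h1 : hasDivB ((t : Int) + 1 + 1) ((k : Int) + 2) = true
            · exfalso
              obtain ⟨d, hd2, hdb, hdm, hdvd⟩ := (hasDivB_iff _ _).mp h1
              have h2 : hasDivB ((t : Int) + 1) ((k : Int) + 2) = true := by
                rw [hasDivB_iff]
                exact ⟨d, hd2, by omega, hdm, hdvd⟩
              rw [h0] at h2; exact absurd h2 (by simp)
            · rw [Bool.not_eq_true] at h1; rw [h1]
        simp only [Nat.cast_succ, hb]
      · rw [List.getElem?_eq_none (by omega)]
        simp

theorem filter_map_aux (p : Int → Bool) : ∀ (ys : List Int), (∀ m ∈ ys, m ≠ 0) →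
    (ys.map (fun m => if p m then m else 0)).filter (fun x => x ≠ 0) = ys.filter p := by
  intro ys
  induction ys with
  | nil => intro _; rfl
  | cons m ys IH =>
    intro h
    simp only [List.map_cons, List.filter_cons]
    have IH2 := IH (fun x hx => h x (List.mem_cons_of_mem m hx))
    simp only [decide_not] at IH2
    by_cases hp : p m = true
    · simp [hp, h m List.mem_cons_self, IH2]
    · simp [hp, IH2]

theorem sieve_eq (n : Int) : sievePy n = sieveAlt n := by
  unfold sievePy sieveAlt
  simp only []
  set base := PySem.List.pyRange 2 n 1 with hbase
  have hmap : (List.range base.length).foldl (fun acc i =>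
      if acc.getD i 0 = 0 then acc
      else sievePyMark acc (acc.getD i 0) n (2 * acc.getD i 0)) base
      = base.map (fun m => if isPrimeLoop m 2 then m else 0) := by
    apply List.ext_getElem?
    intro k
    rw [sieve_fold_getElem? n base.length k, List.getElem?_map]
    rcases Nat.lt_or_ge k base.length with hk | hk
    · rw [List.getElem?_eq_getElem hk, PySem.List.getElem_pyRange_one]
      simp only [Option.map_some]
      congr 1
      have h2k : (2 : Int) + (k : Int) = (k : Int) + 2 := by omega
      rw [h2k]
      have hiff : hasDivB (((base.length : Nat) : Int) + 1) ((k : Int) + 2) = true ↔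
          ¬ isPrimeLoop ((k : Int) + 2) 2 = true := by
        rw [hasDivB_iff, isPrimeLoop_iff ((k : Int) + 2) 2 le_rfl]
        push_neg
        constructor
        · rintro ⟨d, hd2, hdb, hdm, hdvd⟩
          obtain ⟨e, he2, hee, hedvd⟩ :=
            (proper_iff_small ((k : Int) + 2) (by omega)).mp ⟨d, hd2, hdm, hdvd⟩
          exact ⟨e, he2, hee, hedvd⟩
        · rintro ⟨e, he2, hee, hedvd⟩
          obtain ⟨d, hd2, hdm, hdvd⟩ :=
            (proper_iff_small ((k : Int) + 2) (by omega)).mpr ⟨e, he2, hee, hedvd⟩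
          refine ⟨d, hd2, ?_, hdm, hdvd⟩
          have hkN : (k : Int) < (base.length : Int) := by exact_mod_cast hk
          omega
      by_cases hd : hasDivB (((base.length : Nat) : Int) + 1) ((k : Int) + 2) = true
      · have hp : isPrimeLoop ((k : Int) + 2) 2 = false := by
          have h1 := hiff.mp hd
          rwa [Bool.not_eq_true] at h1
        rw [hd, hp]
        rfl
      · have hp : isPrimeLoop ((k : Int) + 2) 2 = true := by
          by_cases h1 : isPrimeLoop ((k : Int) + 2) 2 = true
          · exact h1
          · exact absurd (hiff.mpr h1) hd
        have hdf : hasDivB (((base.length : Nat) : Int) + 1) ((k : Int) + 2) = false := by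
          rwa [Bool.not_eq_true] at hd
        rw [hdf, hp]
        rfl
    · rw [List.getElem?_eq_none (by omega)]
      rfl
  rw [hmap, filter_map_aux]
  intro m hm
  rw [hbase, PySem.List.mem_pyRange_one] at hm
  omega

theorem segment_agree : ∀ (nums : List Int) (known_primes : List Int),
    Pre_segment_py nums known_primes → segment_py nums known_primes = segment_py_alt nums known_primes := by
  intro nums kp hpre
  by_cases hkp : kp = []
  · simp [segment_py, segment_py_alt, hkp, sieve_eq]
  · unfold Pre_segment_py at hpre
    rw [if_neg hkp] at hpre
    have hps := hpre.2
    simp only [segment_py, segment_py_alt, if_neg hkp]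
    set lower := nums.headD 0 with hlo
    set U := nums.getLastD 0 - lower + 1 with hU
    have hmain : kp.foldl (fun acc p =>
        markPy acc p U (if PySem.Int.mod lower p ≠ 0 then p - PySem.Int.mod lower p else PySem.Int.mod lower p)) nums
        = (PySem.List.pyRange 0 U 1).foldl (fun acc i =>
            if kp.any (fun p => PySem.Int.mod (lower + i) p == 0) then acc.set i.toNat 0 else acc) nums := by
      apply List.ext_getElem?
      intro i
      rw [foldB_getElem? lower U kp 0 nums i le_rfl]
      by_cases hex : ∃ p ∈ kp, 0 < p ∧ (i : Int) < U ∧ p ∣ (lower + (i : Int))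
      · rw [foldA_mark lower U kp nums i hex]
        obtain ⟨p, hmem, hp, hiU, hdvd⟩ := hex
        have hany : kp.any (fun p => PySem.Int.mod (lower + (i : Int)) p == 0) = true := by
          rw [List.any_eq_true]
          exact ⟨p, hmem, by rw [beq_iff_eq]; exact (PySem.Int.mod_eq_zero_iff_dvd _ _).mpr hdvd⟩
        rw [if_pos ⟨by omega, hiU, hany⟩]
      · rw [foldA_skip lower U kp nums i hex]
        have hc0 : ¬((0 : Int) ≤ (i : Int) ∧ (i : Int) < U ∧ kp.any (fun p => PySem.Int.mod (lower + (i : Int)) p == 0) = true) := by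
          rintro ⟨-, hiU, hany⟩
          rw [List.any_eq_true] at hany
          obtain ⟨p, hmem, hpmod⟩ := hany
          rw [beq_iff_eq, PySem.Int.mod_eq_zero_iff_dvd] at hpmod
          have := hps p hmem
          simp only at this
          rcases this with ⟨hp, -⟩ | ⟨hp, hUj⟩
          · exact hex ⟨p, hmem, hp, hiU, hpmod⟩
          · obtain ⟨hb1, hb2⟩ := PySem.Int.mod_neg_bounds lower hp
            have hj0 : (if PySem.Int.mod lower p ≠ 0 then p - PySem.Int.mod lower p else PySem.Int.mod lower p) ≤ 0 := by
              split_ifs <;> omega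
            omega
        rw [if_neg hc0]
    rw [hmain]

-- ===== VERDICT (by name: the statement is the Claim_ definition above) =====
theorem segment_py_spec : Claim_equal_segment_py := by
  unfold Claim_equal_segment_py Spec_segment_py
  intro nums kp _ hpre
  exact segment_agree nums kp hpre
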